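-- pv_equiv track=rewrite | github.com/learn-faster/learn-faster-core | src/routers/ai.py | _slice_text_by_pages
-- ===== SOURCE A (Python) =====
-- def _slice_text_by_pages(text: str, start_page: int, end_page: int) -> str:
--     if not text or start_page > end_page:
--         return ""
--     if "## Page" not in text and "## page" not in text:
--         return text
--     lines = text.splitlines()
--     current_page = None
--     bucket = []
--     for line in lines:
--         if line.strip().lower().startswith("## page"):
--             try:
--                 parts = line.strip().split()
--                 page_num = int(parts[-1])
--             except Exception:
--                 page_num = None
--             current_page = page_num
--         if current_page is None:
--             continue
--         if start_page <= current_page <= end_page: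
--             bucket.append(line)
--     return "\n".join(bucket).strip()
-- ===== SOURCE B (Python) =====
-- def _slice_text_by_pages(text: str, start_page: int, end_page: int) -> str:
--     if not text or start_page > end_page:
--         return ""
--     if "## Page" not in text and "## page" not in text:
--         return text
--     # Phase 1: segment the lines into (page_num_or_None, lines) blocks; lines
--     # before the first header are discarded.
--     segments = []
--     for line in text.splitlines():
--         if line.strip().lower().startswith("## page"):
--             try:
--                 page_num = int(line.strip().split()[-1])
--             except Exception:
--                 page_num = None
--             segments.append((page_num, [line]))
--         elif segments:
--             segments[-1][1].append(line)
--     # Phase 2: keep the blocks whose page number is in range, flatten.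
--     kept = [ln for p, ls in segments
--             if p is not None and start_page <= p <= end_page
--             for ln in ls]
--     return "\n".join(kept).strip()
-- ===== Notes on version B (the rewrite author's own statement) =====
-- stated objective: alternative
-- what changed: A keeps a running current_page and appends matching lines inside one stateful scan; B first segments the lines into (page, block) chunks at each '## page' header and then selects and flattens the in-range chunks in a second phase.
import Mathlib
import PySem

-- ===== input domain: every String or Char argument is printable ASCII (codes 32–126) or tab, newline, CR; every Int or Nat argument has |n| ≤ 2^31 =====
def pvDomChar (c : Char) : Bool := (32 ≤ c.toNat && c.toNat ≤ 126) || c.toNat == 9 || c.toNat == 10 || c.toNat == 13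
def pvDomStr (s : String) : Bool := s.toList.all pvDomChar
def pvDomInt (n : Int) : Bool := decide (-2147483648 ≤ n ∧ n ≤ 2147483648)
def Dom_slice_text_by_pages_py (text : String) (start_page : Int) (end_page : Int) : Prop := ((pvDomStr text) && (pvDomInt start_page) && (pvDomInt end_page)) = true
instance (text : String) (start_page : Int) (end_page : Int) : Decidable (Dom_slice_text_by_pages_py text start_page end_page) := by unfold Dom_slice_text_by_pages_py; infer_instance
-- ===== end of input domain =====

-- B re-decomposes A's stateful scan into two phases (segment the lines by '## page'
-- headers, then select and flatten the in-range segments); equivalence of the return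
-- value is proved on all inputs (objective: alternative decomposition, same cost).

-- ===== PORT A =====
def slice_text_by_pages_py (text : String) (start_page : Int) (end_page : Int) : String :=
  if text = "" ∨ start_page > end_page then ""
  else if ¬ (PySem.Str.isIn "## Page" text = true) ∧ ¬ (PySem.Str.isIn "## page" text = true) then text
  else
    let lines := PySem.Str.splitlines text
    let st := lines.foldl (fun (s : Option Int × List String) line =>
      let cur : Option Int :=
        if PySem.Str.startswith (PySem.Str.lower (PySem.Str.strip line)) "## page" then
          match PySem.List.pyGet? (PySem.Str.split₀ (PySem.Str.strip line)) (-1) with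
          | none => none                         -- IndexError caught by the except
          | some last => PySem.Int.ofStr? last   -- int(...) ValueError caught → None
        else s.1
      match cur with
      | none => (none, s.2)                      -- 'continue'
      | some p => (some p, if start_page ≤ p ∧ p ≤ end_page then s.2 ++ [line] else s.2))
      (none, ([] : List String))
    PySem.Str.strip (PySem.Str.join "\n" st.2)

-- ===== PORT B =====
-- segments[-1][1].append(line): append the line to the last segment's line list
def pvAppendLast (segs : List (Option Int × List String)) (line : String) : List (Option Int × List String) :=
  match segs with
  | [] => []
  | [s] => [(s.1, s.2 ++ [line])]
  | s :: rest => s :: pvAppendLast rest line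

def slice_text_by_pages_py_alt (text : String) (start_page : Int) (end_page : Int) : String :=
  if text = "" ∨ start_page > end_page then ""
  else if ¬ (PySem.Str.isIn "## Page" text = true) ∧ ¬ (PySem.Str.isIn "## page" text = true) then text
  else
    -- phase 1: segment the lines at the headers
    let segments := (PySem.Str.splitlines text).foldl
      (fun (segs : List (Option Int × List String)) line =>
        if PySem.Str.startswith (PySem.Str.lower (PySem.Str.strip line)) "## page" then
          segs ++ [((match PySem.List.pyGet? (PySem.Str.split₀ (PySem.Str.strip line)) (-1) with
                     | none => none
                     | some last => PySem.Int.ofStr? last), [line])]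
        else pvAppendLast segs line)   -- 'elif segments: append' ([] stays [])
      ([] : List (Option Int × List String))
    -- phase 2: keep the in-range segments, flatten
    let kept := segments.flatMap (fun seg =>
      match seg.1 with
      | some p => if start_page ≤ p ∧ p ≤ end_page then seg.2 else []
      | none => [])
    PySem.Str.strip (PySem.Str.join "\n" kept)

-- ===== PRECONDITION & SPEC =====
def Spec_slice_text_by_pages_py (text : String) (start_page : Int) (end_page : Int) (out : String) : Prop := out = slice_text_by_pages_py_alt text start_page end_page
instance (text : String) (start_page : Int) (end_page : Int) (out : String) : Decidable (Spec_slice_text_by_pages_py text start_page end_page out) := by unfold Spec_slice_text_by_pages_py; infer_instance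

-- ===== CLAIM (what is proved, stated in full; the proofs are below) =====
def Claim_equal_slice_text_by_pages_py : Prop := ∀ (text : String) (start_page : Int) (end_page : Int), Dom_slice_text_by_pages_py text start_page end_page → Spec_slice_text_by_pages_py text start_page end_page (slice_text_by_pages_py text start_page end_page)

-- ===== LEMMAS AND PROOFS =====

-- the page number of the current (= last) segment; none when no segment is open
def pvCurOf (segs : List (Option Int × List String)) : Option Int :=
  match segs.getLast? with
  | none => none
  | some s => s.1

def pvSel (a b : Int) (segs : List (Option Int × List String)) : List String :=
  segs.flatMap (fun seg =>
    match seg.1 with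
    | some p => if a ≤ p ∧ p ≤ b then seg.2 else []
    | none => [])

theorem pvCurOf_append (segs : List (Option Int × List String)) (s : Option Int × List String) :
    pvCurOf (segs ++ [s]) = s.1 := by
  simp [pvCurOf]

theorem pvSel_append (a b : Int) (segs : List (Option Int × List String)) (s : Option Int × List String) :
    pvSel a b (segs ++ [s]) = pvSel a b segs ++
      (match s.1 with
       | some p => if a ≤ p ∧ p ≤ b then s.2 else []
       | none => []) := by
  simp [pvSel]

theorem pvAppendLast_ne_nil (s : Option Int × List String) (rest : List (Option Int × List String)) (line : String) :
    pvAppendLast (s :: rest) line ≠ [] := by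
  cases rest <;> simp [pvAppendLast]

theorem pvCurOf_cons (x : Option Int × List String) (l : List (Option Int × List String)) (h : l ≠ []) :
    pvCurOf (x :: l) = pvCurOf l := by
  cases l with
  | nil => exact absurd rfl h
  | cons y ys => simp [pvCurOf, List.getLast?_cons_cons]

theorem pvCurOf_appendLast (segs : List (Option Int × List String)) (line : String) :
    pvCurOf (pvAppendLast segs line) = pvCurOf segs := by
  induction segs with
  | nil => rfl
  | cons s rest ih =>
    cases rest with
    | nil => rfl
    | cons t rest' =>
      simp only [pvAppendLast]
      rw [pvCurOf_cons _ _ (pvAppendLast_ne_nil t rest' line),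
          pvCurOf_cons _ _ (by simp : (t :: rest') ≠ ([] : List (Option Int × List String))), ih]

theorem pvSel_appendLast (a b : Int) (segs : List (Option Int × List String)) (line : String)
    (h : segs ≠ []) :
    pvSel a b (pvAppendLast segs line) =
      pvSel a b segs ++
        (match pvCurOf segs with
         | some p => if a ≤ p ∧ p ≤ b then [line] else []
         | none => []) := by
  induction segs with
  | nil => exact absurd rfl h
  | cons s rest ih =>
    cases rest with
    | nil =>
      simp only [pvAppendLast, pvSel, pvCurOf, List.flatMap_cons, List.flatMap_nil,
        List.getLast?_singleton]
      cases s.1 with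
      | none => simp
      | some p => by_cases hp : a ≤ p ∧ p ≤ b <;> simp [hp]
    | cons t rest' =>
      have hne : (t :: rest') ≠ ([] : List (Option Int × List String)) := by simp
      simp only [pvAppendLast, pvSel, List.flatMap_cons]
      have := ih hne
      simp only [pvSel] at this
      rw [this]
      rw [pvCurOf_cons _ _ hne]
      simp [List.append_assoc]

-- the loop invariant: A's fold state is determined by B's fold state
theorem pv_loop (a b : Int) (lines : List String)
    (cur : Option Int) (bucket : List String) (segs : List (Option Int × List String))
    (hcur : cur = pvCurOf segs) (hbucket : bucket = pvSel a b segs) :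
    (lines.foldl (fun (s : Option Int × List String) line =>
      let c : Option Int :=
        if PySem.Str.startswith (PySem.Str.lower (PySem.Str.strip line)) "## page" then
          match PySem.List.pyGet? (PySem.Str.split₀ (PySem.Str.strip line)) (-1) with
          | none => none
          | some last => PySem.Int.ofStr? last
        else s.1
      match c with
      | none => (none, s.2)
      | some p => (some p, if a ≤ p ∧ p ≤ b then s.2 ++ [line] else s.2)) (cur, bucket)).2
    = pvSel a b (lines.foldl (fun segs line =>
        if PySem.Str.startswith (PySem.Str.lower (PySem.Str.strip line)) "## page" then
          segs ++ [((match PySem.List.pyGet? (PySem.Str.split₀ (PySem.Str.strip line)) (-1) with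
                     | none => none
                     | some last => PySem.Int.ofStr? last), [line])]
        else pvAppendLast segs line) segs) := by
  induction lines generalizing cur bucket segs with
  | nil => exact hbucket
  | cons line rest ih =>
    simp only [List.foldl_cons]
    by_cases hhdr : PySem.Str.startswith (PySem.Str.lower (PySem.Str.strip line)) "## page" = true
    · -- header line: a new segment opens
      set p? : Option Int := (match PySem.List.pyGet? (PySem.Str.split₀ (PySem.Str.strip line)) (-1) with
        | none => none
        | some last => PySem.Int.ofStr? last)
      simp only [hhdr, if_pos]
      cases hp : p? with
      | none =>
        apply ih
        · rw [pvCurOf_append]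
        · rw [pvSel_append, hbucket]; simp
      | some p =>
        by_cases hr : a ≤ p ∧ p ≤ b
        · simp only [hr, and_self, if_pos]
          apply ih
          · rw [pvCurOf_append]
          · rw [pvSel_append]; simp [hbucket, hr]
        · simp only [hr, if_neg, not_false_iff]
          apply ih
          · rw [pvCurOf_append]
          · rw [pvSel_append]; simp [hbucket, hr]
    · -- ordinary line
      simp only [hhdr, if_neg, Bool.not_eq_true]
      cases hsegs : segs with
      | nil =>
        have hc : cur = none := by rw [hcur, hsegs]; rfl
        rw [hc]
        exact ih none bucket [] rfl (by rw [hbucket, hsegs])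
      | cons s rest' =>
        have hne : segs ≠ [] := by rw [hsegs]; simp
        rw [← hsegs]
        cases hc : cur with
        | none =>
          apply ih
          · rw [pvCurOf_appendLast, ← hcur, hc]
          · rw [pvSel_appendLast a b segs line hne, ← hcur, hc, hbucket]; simp
        | some p =>
          by_cases hr : a ≤ p ∧ p ≤ b
          · simp only [hr, and_self, if_pos]
            apply ih
            · rw [pvCurOf_appendLast, ← hcur, hc]
            · rw [pvSel_appendLast a b segs line hne, ← hcur, hc]; simp [hbucket, hr]
          · simp only [hr, if_neg, not_false_iff]
            apply ih
            · rw [pvCurOf_appendLast, ← hcur, hc]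
            · rw [pvSel_appendLast a b segs line hne, ← hcur, hc]; simp [hbucket, hr]

-- ===== VERDICT (by name: the statement is the Claim_ definition above) =====
theorem slice_text_by_pages_py_spec : Claim_equal_slice_text_by_pages_py := by
  intro text a b _
  unfold Spec_slice_text_by_pages_py slice_text_by_pages_py slice_text_by_pages_py_alt
  split_ifs with h1 h2
  · rfl
  · rfl
  · have := pv_loop a b (PySem.Str.splitlines text) none [] [] rfl rfl
    simp only [pvSel] at this
    exact congrArg (fun l => PySem.Str.strip (PySem.Str.join "\n" l)) this
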